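-- pv_equiv track=rewrite | github.com/ZM-Kimu/Blue-Archive-Asset-Downloader | scripts/update_changelog.py | _build_unreleased_body_from_commits
-- ===== SOURCE A (Python) =====
-- from collections import OrderedDict
-- from collections.abc import Sequence
--
-- NO_UNRELEASED_CHANGES = "- No unreleased changes recorded."
--
-- SECTION_TITLES = OrderedDict(
--     [
--         ("feat", "Features"),
--         ("fix", "Fixes"),
--         ("refactor", "Refactors"),
--         ("perf", "Performance"),
--         ("docs", "Documentation"),
--         ("test", "Tests"),
--         ("build", "Build"),
--         ("ci", "CI"),
--         ("chore", "Chores"),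
--         ("other", "Other Changes"),
--     ]
-- )
--
-- def _normalize_commit_message(message: str) -> tuple[str, str]:
--     if ":" not in message:
--         return "other", message
--
--     prefix, summary = message.split(":", 1)
--     prefix = prefix.strip().casefold()
--     summary = summary.strip()
--     if not summary:
--         return "other", message
--
--     if "(" in prefix:
--         prefix = prefix.split("(", 1)[0]
--     if prefix.endswith("!"):
--         prefix = prefix[:-1]
--
--     if prefix in SECTION_TITLES:
--         return prefix, summary
--     return "other", message
--
-- def _build_unreleased_body_from_commits(commits: Sequence[str]) -> str:
--     grouped: dict[str, list[str]] = {key: [] for key in SECTION_TITLES}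
--
--     for commit in commits:
--         category, summary = _normalize_commit_message(commit)
--         grouped[category].append(summary)
--
--     if not commits:
--         return NO_UNRELEASED_CHANGES
--
--     lines: list[str] = []
--     for key, title in SECTION_TITLES.items():
--         entries = grouped[key]
--         if not entries:
--             continue
--         lines.append(f"### {title}")
--         for entry in entries:
--             lines.append(f"- {entry}")
--         lines.append("")
--
--     return "\n".join(lines).rstrip()
-- ===== SOURCE B (Python) =====
-- NO_UNRELEASED_CHANGES = "- No unreleased changes recorded."
--
-- SECTION_TITLES = {
--     "feat": "Features",
--     "fix": "Fixes",
--     "refactor": "Refactors",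
--     "perf": "Performance",
--     "docs": "Documentation",
--     "test": "Tests",
--     "build": "Build",
--     "ci": "CI",
--     "chore": "Chores",
--     "other": "Other Changes",
-- }
--
--
-- def _canon_prefix(prefix: str) -> str:
--     prefix = prefix.strip().casefold()
--     if "(" in prefix:
--         prefix = prefix.split("(", 1)[0]
--     if prefix.endswith("!"):
--         prefix = prefix[:-1]
--     return prefix
--
--
-- def _categorize(message: str) -> tuple[str, str]:
--     if ":" in message:
--         prefix, rest = message.split(":", 1)
--         summary = rest.strip()
--         if summary:
--             key = _canon_prefix(prefix)
--             if key in SECTION_TITLES: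
--                 return key, summary
--     return "other", message
--
--
-- def _build_unreleased_body_from_commits(commits):
--     if not commits:
--         return NO_UNRELEASED_CHANGES
--     pairs = [_categorize(c) for c in commits]
--     sections = []
--     for key, title in SECTION_TITLES.items():
--         summaries = [s for cat, s in pairs if cat == key]
--         if summaries:
--             sections.append(
--                 "### " + title + "\n" + "\n".join("- " + s for s in summaries)
--             )
--     return "\n\n".join(sections).rstrip()
-- ===== Notes on version B (the rewrite author's own statement) =====
-- stated objective: alternative
-- what changed: B drops A's pre-initialized dict-of-lists grouping: it normalizes commits once into a flat (category, summary) table, then filters that table per SECTION_TITLES entry and emits each non-empty section as one block joined by blank lines, with the normalizer refactored into a nested fall-through guard plus a prefix-canonicalizing helper.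
import Mathlib
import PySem

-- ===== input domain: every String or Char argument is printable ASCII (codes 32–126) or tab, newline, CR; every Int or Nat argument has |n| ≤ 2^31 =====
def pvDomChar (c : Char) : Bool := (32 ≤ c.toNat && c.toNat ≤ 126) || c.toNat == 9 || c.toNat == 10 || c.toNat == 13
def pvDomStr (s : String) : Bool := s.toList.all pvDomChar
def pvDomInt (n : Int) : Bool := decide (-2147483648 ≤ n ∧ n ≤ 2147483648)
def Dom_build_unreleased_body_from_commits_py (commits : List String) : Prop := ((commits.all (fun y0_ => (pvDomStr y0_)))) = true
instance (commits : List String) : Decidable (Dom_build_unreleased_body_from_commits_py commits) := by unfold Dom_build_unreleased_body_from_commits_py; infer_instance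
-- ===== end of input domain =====

-- B replaces A's single-pass dict-of-lists grouping by a flat normalized (category, summary) table
-- filtered once per section, in a different fall-through decomposition of the normalizer (objective: alternative).
-- Both ports render .casefold() as PySem.Str.lower, exact on the ASCII domain above.

-- ===== PORT A =====
def pyNO_UNRELEASED_CHANGES : String := "- No unreleased changes recorded."

def pySECTION_TITLES : PySem.Dict String String := PySem.Dict.mk
  [("feat","Features"),("fix","Fixes"),("refactor","Refactors"),("perf","Performance"),
   ("docs","Documentation"),("test","Tests"),("build","Build"),("ci","CI"),
   ("chore","Chores"),("other","Other Changes")]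

def normalize_commit_message_py (message : String) : String × String :=
  if PySem.Str.isIn ":" message = false then ("other", message)
  else
    match PySem.Str.splitMax? message ":" 1 with
    | some (pre :: summ0 :: _) =>
        let pfx0 := PySem.Str.lower (PySem.Str.strip pre)
        let summary := PySem.Str.strip summ0
        if summary = "" then ("other", message)
        else
          let pfx1 := if PySem.Str.isIn "(" pfx0 = true then
              (match PySem.Str.splitMax? pfx0 "(" 1 with
               | some (a :: _) => a
               | _ => pfx0)
            else pfx0
          let pfx2 := if PySem.Str.endswith pfx1 "!" = true then PySem.Str.slice pfx1 none (some (-1)) else pfx1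
          if pySECTION_TITLES.contains pfx2 = true then (pfx2, summary) else ("other", message)
    | _ => ("other", message)   -- unreachable: with ":" in message, split(":", 1) has two parts

def build_unreleased_body_from_commits_py (commits : List String) : String :=
  let grouped0 := pySECTION_TITLES.keys.foldl (fun d k => d.insert k ([] : List String)) PySem.Dict.empty
  let grouped := commits.foldl (fun d commit =>
      let p := normalize_commit_message_py commit
      d.modify p.1 [] (fun l => l ++ [p.2])) grouped0
  if commits = [] then pyNO_UNRELEASED_CHANGES
  else
    let lines := pySECTION_TITLES.items.foldl (fun lines kv =>
      let entries := grouped.getD kv.1 []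
      if entries = [] then lines
      else lines ++ (("### " ++ kv.2) :: entries.map (fun e => "- " ++ e) ++ [""])) ([] : List String)
    PySem.Str.rstrip (PySem.Str.join "\n" lines)

-- ===== PORT B =====
def canon_prefix_py (pre : String) : String :=
  let p0 := PySem.Str.lower (PySem.Str.strip pre)
  let p1 := if PySem.Str.isIn "(" p0 = true then
      (match PySem.Str.splitMax? p0 "(" 1 with
       | some (a :: _) => a
       | _ => p0)
    else p0
  if PySem.Str.endswith p1 "!" = true then PySem.Str.slice p1 none (some (-1)) else p1

def categorize_py (message : String) : String × String :=
  if PySem.Str.isIn ":" message = true then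
    match PySem.Str.splitMax? message ":" 1 with
    | some (pre :: rest :: _) =>
        let summary := PySem.Str.strip rest
        if summary ≠ "" then
          let key := canon_prefix_py pre
          if pySECTION_TITLES.contains key = true then (key, summary) else ("other", message)
        else ("other", message)
    | _ => ("other", message)
  else ("other", message)

def build_unreleased_body_from_commits_py_alt (commits : List String) : String :=
  if commits = [] then pyNO_UNRELEASED_CHANGES
  else
    let pairs := commits.map categorize_py
    let sections := pySECTION_TITLES.items.foldl (fun secs kv =>
      let summaries := (pairs.filter (fun p => p.1 == kv.1)).map (fun p => p.2)
      if summaries = [] then secs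
      else secs ++ ["### " ++ kv.2 ++ "\n" ++ PySem.Str.join "\n" (summaries.map (fun s => "- " ++ s))]) ([] : List String)
    PySem.Str.rstrip (PySem.Str.join "\n\n" sections)

-- ===== PRECONDITION & SPEC =====
def Spec_build_unreleased_body_from_commits_py (commits : List String) (out : String) : Prop := out = build_unreleased_body_from_commits_py_alt commits
instance (commits : List String) (out : String) : Decidable (Spec_build_unreleased_body_from_commits_py commits out) := by unfold Spec_build_unreleased_body_from_commits_py; infer_instance

-- ===== CLAIM (what is proved, stated in full; the proofs are below) =====
def Claim_equal_build_unreleased_body_from_commits_py : Prop := ∀ (commits : List String), Dom_build_unreleased_body_from_commits_py commits → Spec_build_unreleased_body_from_commits_py commits (build_unreleased_body_from_commits_py commits)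

-- ===== LEMMAS AND PROOFS =====

-- B's normalizer computes A's (same primitives, different fall-through decomposition)
lemma norm_eq (m : String) : categorize_py m = normalize_commit_message_py m := by
  unfold categorize_py normalize_commit_message_py canon_prefix_py
  cases hc : PySem.Str.isIn ":" m with
  | false => simp
  | true =>
      simp only [Bool.true_eq_false, if_false, if_true]
      cases hs : PySem.Str.splitMax? m ":" 1 with
      | none => rfl
      | some parts =>
          match parts with
          | [] => rfl
          | [_] => rfl
          | pre :: rest :: tl => by_cases hsum : PySem.Str.strip rest = "" <;> simp [hsum]

-- the pre-initialised grouping dict maps every key to []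
lemma grouped0_getD (c : String) :
    ((pySECTION_TITLES.keys.foldl (fun d k => d.insert k ([] : List String)) PySem.Dict.empty).getD c []) = [] := by
  simp only [pySECTION_TITLES, PySem.Dict.keys_mk, List.map_cons, List.map_nil,
    List.foldl_cons, List.foldl_nil, PySem.Dict.getD_insert]
  split_ifs <;> simp [PySem.Dict.getD, PySem.Dict.get?, PySem.Dict.empty]

-- 'if entries: out += block(entries)' fold = flatMap over the filtered list
lemma foldl_if_append {α β : Type} (P : α → Prop) [DecidablePred P] (g : α → List β) :
    ∀ (l : List α) (acc : List β),
      l.foldl (fun acc x => if P x then acc else acc ++ g x) acc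
        = acc ++ ((l.filter fun x => decide (¬ P x)).flatMap g) := by
  intro l
  induction l with
  | nil => simp
  | cons a l ih =>
      intro acc
      by_cases h : P a <;> simp [h, ih]

lemma rstrip_append_newline (l : List Char) :
    PySem.Chars.rstrip (l ++ ['\n']) = PySem.Chars.rstrip l := by
  simp [PySem.Chars.rstrip, show PySem.Chars.isspace '\n' = true from rfl]

lemma join_append_of_ne_nil (sep : List Char) :
    ∀ (xs ys : List (List Char)), xs ≠ [] → ys ≠ [] →
      PySem.Chars.join sep (xs ++ ys) = PySem.Chars.join sep xs ++ sep ++ PySem.Chars.join sep ys := by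
  intro xs
  induction xs with
  | nil => simp
  | cons a xs ih =>
      intro ys _ hys
      cases xs with
      | nil =>
          cases ys with
          | nil => simp at hys
          | cons b ys => simp [PySem.Chars.join_cons_cons, PySem.Chars.join_singleton]
      | cons a' xs' =>
          have hx := ih ys (by simp) hys
          simp only [List.cons_append] at hx ⊢
          rw [PySem.Chars.join_cons_cons, PySem.Chars.join_cons_cons, hx]
          simp [List.append_assoc]

-- one section rendered as lines, then joined, is its block string plus a trailing newline
def blockC (p : List Char × List (List Char)) : List Char :=
  p.1 ++ '\n' :: PySem.Chars.join ['\n'] p.2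

lemma one_block (p : List Char × List (List Char)) (h : p.2 ≠ []) :
    PySem.Chars.join ['\n'] (p.1 :: p.2 ++ [[]]) = blockC p ++ ['\n'] := by
  obtain ⟨h1, h2⟩ := p
  cases h2 with
  | nil => simp at h
  | cons c cs =>
      have hj := join_append_of_ne_nil ['\n'] (h1 :: c :: cs) [[]] (by simp) (by simp)
      simp only [List.cons_append] at hj ⊢
      rw [hj, PySem.Chars.join_singleton, PySem.Chars.join_cons_cons]
      simp [blockC, List.append_assoc]

lemma joinA_blocks :
    ∀ (bs : List (List Char × List (List Char))) (b : List Char × List (List Char)),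
      (∀ p ∈ b :: bs, p.2 ≠ []) →
      PySem.Chars.join ['\n'] ((b :: bs).flatMap (fun p => p.1 :: p.2 ++ [[]])) ++ ['\n']
        = (b :: bs).flatMap (fun p => blockC p ++ ['\n', '\n']) := by
  intro bs
  induction bs with
  | nil =>
      intro b h
      simp only [List.flatMap_cons, List.flatMap_nil, List.append_nil]
      rw [one_block b (h b (by simp))]
      simp
  | cons b' bs ih =>
      intro b h
      have hrest := ih b' (fun p hp => h p (by simp at hp ⊢; tauto))
      conv_lhs => rw [List.flatMap_cons]
      rw [join_append_of_ne_nil ['\n'] _ _ (by simp) (by simp [List.flatMap_cons])]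
      rw [one_block b (h b (by simp))]
      conv_rhs => rw [List.flatMap_cons]
      rw [← hrest]
      simp [List.append_assoc]

lemma joinB_blocks :
    ∀ (bs : List (List Char × List (List Char))) (b : List Char × List (List Char)),
      PySem.Chars.join ['\n', '\n'] ((b :: bs).map blockC) ++ ['\n', '\n']
        = (b :: bs).flatMap (fun p => blockC p ++ ['\n', '\n']) := by
  intro bs
  induction bs with
  | nil => simp [PySem.Chars.join_singleton]
  | cons b' bs ih =>
      intro b
      rw [List.map_cons, List.map_cons, PySem.Chars.join_cons_cons, ← List.map_cons]
      conv_rhs => rw [List.flatMap_cons]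
      rw [← ih b']
      simp [List.append_assoc]

lemma key_chars (cs : List (List Char × List (List Char))) (c : List Char × List (List Char))
    (hne : ∀ p ∈ c :: cs, p.2 ≠ []) :
    PySem.Chars.rstrip (PySem.Chars.join ['\n'] ((c :: cs).flatMap fun q => q.1 :: q.2 ++ [[]]))
      = PySem.Chars.rstrip (PySem.Chars.join ['\n', '\n'] ((c :: cs).map blockC)) := by
  rw [← rstrip_append_newline (PySem.Chars.join ['\n'] ((c :: cs).flatMap fun q => q.1 :: q.2 ++ [[]]))]
  rw [joinA_blocks cs c hne, ← joinB_blocks cs c]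
  rw [show PySem.Chars.join ['\n', '\n'] ((c :: cs).map blockC) ++ ['\n', '\n']
        = (PySem.Chars.join ['\n', '\n'] ((c :: cs).map blockC) ++ ['\n']) ++ ['\n'] by
      simp [List.append_assoc]]
  rw [rstrip_append_newline, rstrip_append_newline]

-- A's line list and B's section list render to the same string after rstrip
lemma main_join (bs : List (String × List String)) (h : ∀ p ∈ bs, p.2 ≠ []) :
    PySem.Str.rstrip (PySem.Str.join "\n" (bs.flatMap fun p => p.1 :: p.2 ++ [""]))
      = PySem.Str.rstrip (PySem.Str.join "\n\n" (bs.map fun p => p.1 ++ "\n" ++ PySem.Str.join "\n" p.2)) := by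
  cases bs with
  | nil => simp [PySem.Str.join, PySem.Chars.join_nil]
  | cons b bs =>
      simp only [PySem.Str.rstrip, PySem.Str.toList_join]
      congr 1
      have hmap1 : ((b :: bs).flatMap fun p => p.1 :: p.2 ++ [""]).map String.toList
          = ((b :: bs).map fun p => (p.1.toList, p.2.map String.toList)).flatMap
              (fun q => q.1 :: q.2 ++ [[]]) := by
        simp [List.map_flatMap, List.flatMap_map]
      have hmap2 : ((b :: bs).map fun p => p.1 ++ "\n" ++ PySem.Str.join "\n" p.2).map String.toList
          = ((b :: bs).map fun p => (p.1.toList, p.2.map String.toList)).map blockC := by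
        simp [List.map_map, Function.comp, blockC, PySem.Str.toList_join, String.toList_append]
      rw [hmap1, hmap2]
      rw [show ("\n" : String).toList = ['\n'] from rfl,
          show ("\n\n" : String).toList = ['\n', '\n'] from rfl]
      rw [List.map_cons]
      exact key_chars _ _ (by
        intro p hp
        rcases List.mem_cons.mp hp with rfl | hmem
        · simpa using h b (by simp)
        · obtain ⟨q, hq, rfl⟩ := List.mem_map.mp hmem
          simpa using h q (List.mem_cons_of_mem _ hq))

-- ===== VERDICT (by name: the statement is the Claim_ definition above) =====
theorem build_unreleased_body_from_commits_py_spec : Claim_equal_build_unreleased_body_from_commits_py := by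
  unfold Claim_equal_build_unreleased_body_from_commits_py
  intro commits _
  unfold Spec_build_unreleased_body_from_commits_py
  unfold build_unreleased_body_from_commits_py build_unreleased_body_from_commits_py_alt
  by_cases hc : commits = []
  · simp [hc]
  · simp only [if_neg hc]
    have hnorm : commits.map categorize_py = commits.map normalize_commit_message_py :=
      List.map_congr_left (fun x _ => norm_eq x)
    have hg : ∀ k : String,
        (commits.foldl (fun d commit =>
            let p := normalize_commit_message_py commit
            d.modify p.1 [] (fun l => l ++ [p.2]))
          (pySECTION_TITLES.keys.foldl (fun d k => d.insert k ([] : List String)) PySem.Dict.empty)).getD k []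
        = ((commits.map normalize_commit_message_py).filter (fun p => p.1 == k)).map (fun p => p.2) := by
      intro k
      have h1 := PySem.Dict.getD_foldl_modify_append
        (commits.map normalize_commit_message_py)
        (pySECTION_TITLES.keys.foldl (fun d k => d.insert k ([] : List String)) PySem.Dict.empty) k
      rw [List.foldl_map] at h1
      rw [grouped0_getD] at h1
      simpa using h1
    rw [hnorm]
    simp only [hg]
    rw [foldl_if_append
        (fun kv : String × String =>
          ((commits.map normalize_commit_message_py).filter (fun p => p.1 == kv.1)).map (fun p => p.2) = [])
        (fun kv : String × String =>
          ("### " ++ kv.2) ::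
            (((commits.map normalize_commit_message_py).filter (fun p => p.1 == kv.1)).map (fun p => p.2)).map
              (fun e => "- " ++ e) ++ [""])
        pySECTION_TITLES.items []]
    rw [foldl_if_append
        (fun kv : String × String =>
          ((commits.map normalize_commit_message_py).filter (fun p => p.1 == kv.1)).map (fun p => p.2) = [])
        (fun kv : String × String =>
          ["### " ++ kv.2 ++ "\n" ++ PySem.Str.join "\n"
            ((((commits.map normalize_commit_message_py).filter (fun p => p.1 == kv.1)).map (fun p => p.2)).map
              (fun s => "- " ++ s))])
        pySECTION_TITLES.items []]
    simp only [List.nil_append]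
    have hmj := main_join
      ((pySECTION_TITLES.items.filter fun kv =>
          decide (¬ ((commits.map normalize_commit_message_py).filter (fun p => p.1 == kv.1)).map (fun p => p.2) = [])).map
        (fun kv => ("### " ++ kv.2,
          (((commits.map normalize_commit_message_py).filter (fun p => p.1 == kv.1)).map (fun p => p.2)).map
            (fun s => "- " ++ s))))
      (by
        intro p hp
        obtain ⟨kv, hkv, rfl⟩ := List.mem_map.mp hp
        have hne := (List.mem_filter.mp hkv).2
        simp at hne ⊢
        exact hne)
    rw [List.flatMap_map, List.map_map] at hmj
    have hsing : ∀ {α β : Type} (f : α → β) (l : List α), l.flatMap (fun x => [f x]) = l.map f := by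
      intro α β f l
      induction l with
      | nil => rfl
      | cons a t ih => simp [ih]
    rw [hsing]
    exact hmj
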